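-- pv_equiv track=rewrite | github.com/daniel-gonzalez-cedre/2024_fall_principles-of-computing | lectures/lecture06/lecture06.py | sum_even_up_to
-- ===== SOURCE A (Python) =====
-- def sum_even_up_to(n):
--   even_digits = [0, 2, 4, 6, 8]
--   total = 0
--
--   for i in range(0, n):
--     last_digit = int(str(i)[-1])
--     if last_digit in even_digits:
--       total += 1
--
--   return total
-- ===== SOURCE B (Python) =====
-- def sum_even_up_to(n):
--   # closed form: among 0..n-1 there are 5 per full decade plus the evens in the tail
--   if n <= 0:
--     return 0
--   return 5 * (n // 10) + (n % 10 + 1) // 2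
-- ===== Notes on version B (the rewrite author's own statement) =====
-- stated objective: faster
-- what changed: Replaces the O(n) loop that stringifies each i and tests its last character with a closed-form count 5*(n//10) + (n%10+1)//2.
import Mathlib
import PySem

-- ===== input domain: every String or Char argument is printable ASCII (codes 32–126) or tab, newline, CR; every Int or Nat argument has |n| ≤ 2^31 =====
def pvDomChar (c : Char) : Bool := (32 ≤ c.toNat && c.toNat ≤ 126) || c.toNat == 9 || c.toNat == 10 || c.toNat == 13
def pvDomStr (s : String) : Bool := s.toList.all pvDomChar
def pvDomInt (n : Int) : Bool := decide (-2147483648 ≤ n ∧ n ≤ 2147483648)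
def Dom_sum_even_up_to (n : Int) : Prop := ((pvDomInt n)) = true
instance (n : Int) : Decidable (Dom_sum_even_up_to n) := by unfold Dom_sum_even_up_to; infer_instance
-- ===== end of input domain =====

-- B replaces A's O(n) loop (stringify each i, test its last character) with the closed form
-- 5*(n//10) + (n%10+1)//2; measured asymptotically faster.

-- ===== PORT A =====
-- int(str(i)[-1]); the `.getD 0` only totalises an unreachable case (str(i) is never empty
-- and its last character is always a digit, so both Options are always `some`)
def pvLastDigit (i : Int) : Int :=
  ((PySem.Chars.pyGet? (PySem.Int.toChars i) (-1)).bind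
    (fun c => PySem.Int.ofChars? [c])).getD 0

def sum_even_up_to (n : Int) : Int :=
  (PySem.List.pyRange 0 n 1).foldl
    (fun total i =>
      if pvLastDigit i ∈ ([0, 2, 4, 6, 8] : List Int) then total + 1 else total) 0

-- ===== PORT B =====
def sum_even_up_to_alt (n : Int) : Int :=
  if n ≤ 0 then 0
  else 5 * PySem.Int.floordiv n 10 + PySem.Int.floordiv (PySem.Int.mod n 10 + 1) 2

-- ===== PRECONDITION & SPEC =====
def Spec_sum_even_up_to (n : Int) (out : Int) : Prop := out = sum_even_up_to_alt n
instance (n : Int) (out : Int) : Decidable (Spec_sum_even_up_to n out) := by unfold Spec_sum_even_up_to; infer_instance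

-- ===== CLAIM (what is proved, stated in full; the proofs are below) =====
def Claim_equal_sum_even_up_to : Prop := ∀ (n : Int), Dom_sum_even_up_to n → Spec_sum_even_up_to n (sum_even_up_to n)

-- ===== LEMMAS AND PROOFS =====

-- `toDigitsCore` only ever prepends to its accumulator
theorem pv_toDigitsCore_suffix (b : Nat) :
    ∀ (f n : Nat) (l : List Char), ∃ pre, Nat.toDigitsCore b f n l = pre ++ l := by
  intro f
  induction f with
  | zero => intro n l; exact ⟨[], rfl⟩
  | succ f ih =>
    intro n l
    simp only [Nat.toDigitsCore]
    by_cases h : n / b = 0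
    · exact ⟨[(n % b).digitChar], by simp [h]⟩
    · obtain ⟨pre, hpre⟩ := ih (n / b) ((n % b).digitChar :: l)
      exact ⟨pre ++ [(n % b).digitChar], by simp [h, hpre]⟩

-- the decimal string of m ends in the digit character of m % 10
theorem pv_toDigits_last (m : Nat) :
    ∃ pre, Nat.toDigits 10 m = pre ++ [(m % 10).digitChar] := by
  simp only [Nat.toDigits, Nat.toDigitsCore]
  by_cases h : m / 10 = 0
  · refine ⟨[], ?_⟩
    have hm : m % 10 = m := Nat.mod_eq_of_lt (by omega)
    simp [h, hm]
  · obtain ⟨pre, hpre⟩ := pv_toDigitsCore_suffix 10 m (m / 10) [(m % 10).digitChar]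
    exact ⟨pre, by simp [h, hpre]⟩

theorem pv_ofChars_digitChar (r : Nat) (h : r < 10) :
    PySem.Int.ofChars? [r.digitChar] = some (r : Int) := by
  interval_cases r <;> decide

theorem pv_lastDigit_eq (m : Nat) : pvLastDigit (m : Int) = ((m % 10 : Nat) : Int) := by
  unfold pvLastDigit
  have h1 : PySem.Int.toChars (m : Int) = Nat.toDigits 10 m := by
    simp [PySem.Int.toChars]
  obtain ⟨pre, hpre⟩ := pv_toDigits_last m
  rw [h1, hpre]
  have hget : PySem.Chars.pyGet? (pre ++ [(m % 10).digitChar]) (-1) = some ((m % 10).digitChar) := by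
    simp [PySem.Chars.pyGet?]
  rw [hget, Option.bind_some, pv_ofChars_digitChar (m % 10) (by omega)]
  rfl

-- loop characterisation: the foldl over range(0, k) equals the closed form, for k : Nat
theorem pv_loop_closed (k : Nat) :
    sum_even_up_to (k : Int) = 5 * ((k : Int) / 10) + (((k : Int) % 10) + 1) / 2 := by
  induction k with
  | zero => simp [sum_even_up_to]
  | succ k ih =>
    have hk : ((k : Int) + 1) = ((k + 1 : Nat) : Int) := by push_cast; ring
    have hsplit : PySem.List.pyRange 0 ((k : Int) + 1) 1 = PySem.List.pyRange 0 (k : Int) 1 ++ [(k : Int)] := by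
      exact PySem.List.pyRange_one_succ_right (by omega)
    unfold sum_even_up_to at ih ⊢
    rw [← hk, hsplit, List.foldl_append, ih]
    simp only [List.foldl_cons, List.foldl_nil, pv_lastDigit_eq k]
    have hmem : (((k % 10 : Nat) : Int) ∈ ([0, 2, 4, 6, 8] : List Int)) ↔ k % 2 = 0 := by
      simp only [List.mem_cons, List.not_mem_nil, or_false]
      omega
    by_cases hp : k % 2 = 0
    · rw [if_pos (hmem.mpr hp)]; omega
    · rw [if_neg (fun h => hp (hmem.mp h))]; omega

-- ===== VERDICT (by name: the statement is the Claim_ definition above) =====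
theorem sum_even_up_to_spec : Claim_equal_sum_even_up_to := by
  intro n _
  unfold Spec_sum_even_up_to sum_even_up_to_alt
  by_cases hn : n ≤ 0
  · rw [if_pos hn]
    unfold sum_even_up_to
    rw [PySem.List.pyRange_one_eq_nil (by omega)]
    rfl
  · rw [if_neg hn,
        PySem.Int.floordiv_eq_ediv_of_pos (by norm_num : (0:Int) < 10),
        PySem.Int.mod_eq_emod_of_pos (by norm_num : (0:Int) < 10),
        PySem.Int.floordiv_eq_ediv_of_pos (by norm_num : (0:Int) < 2)]
    have h : n = ((n.toNat : Nat) : Int) := by omega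
    rw [h]
    exact pv_loop_closed n.toNat
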